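-- pv_equiv track=rewrite | github.com/ArianGhanooni/Asymmetric-Key-Encryption | KeyGenerator.py | stringToBlock
-- ===== SOURCE A (Python) =====
-- import string
--
-- symbols = " " + string.punctuation + string.digits + string.ascii_letters
--
-- block_size = 16
--
-- def stringToBlock(plainText):
--     # Converts a list of numeric blocks back into a readable text string using the symbols list.
--     # Used to restore the decrypted message to its original form.
--
--     output = []
--
--     while plainText:
--         block_number = 0
--         block_string = None
--
--         if len(plainText) >= block_size:
--             block_string = plainText[0:block_size]
--             plainText = plainText[block_size:]
--         else:
--             block_string = plainText
--             plainText = ""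
--
--         for i in range(len(block_string)):
--             index = symbols.find(block_string[i])
--             block_number += (index * (len(symbols) ** i))
--
--         output.append(block_number)
--
--     return output
-- ===== SOURCE B (Python) =====
-- import string
--
-- symbols = " " + string.punctuation + string.digits + string.ascii_letters
--
-- block_size = 16
--
-- POWERS = [len(symbols) ** i for i in range(block_size)]
--
-- def stringToBlock(plainText):
--     # One flat pass: preallocate the output and scatter each character's
--     # contribution symbols.find(ch) * POWERS[pos % 16] into slot pos // 16.
--     # No chunk slicing, no inner per-block loop.
--     output = [0] * ((len(plainText) + block_size - 1) // block_size)
--     for pos, ch in enumerate(plainText):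
--         output[pos // block_size] += symbols.find(ch) * POWERS[pos % block_size]
--     return output
-- ===== Notes on version B (the rewrite author's own statement) =====
-- stated objective: faster
-- what changed: Replaces the while-loop that slices 16-char blocks with a nested per-block power loop by one flat enumerate pass over the whole string that scatters each character's contribution (via a precomputed power table) into a preallocated output slot pos//16.
import Mathlib
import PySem

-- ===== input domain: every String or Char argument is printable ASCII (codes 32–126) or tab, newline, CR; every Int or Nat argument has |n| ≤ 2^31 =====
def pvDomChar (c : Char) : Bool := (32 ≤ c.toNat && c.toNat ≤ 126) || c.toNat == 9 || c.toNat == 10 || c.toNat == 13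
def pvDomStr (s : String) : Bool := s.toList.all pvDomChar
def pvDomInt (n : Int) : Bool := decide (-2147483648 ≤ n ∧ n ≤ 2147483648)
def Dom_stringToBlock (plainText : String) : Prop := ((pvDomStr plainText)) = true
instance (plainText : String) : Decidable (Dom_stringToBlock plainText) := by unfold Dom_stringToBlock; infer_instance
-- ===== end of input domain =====

-- B replaces A's while-loop (slice a 16-char block, inner power loop) by one flat enumerate
-- pass scattering each character's contribution into output[pos//16] via a power table (alternative decomposition).

-- symbols = " " + string.punctuation + string.digits + string.ascii_letters
def pvSymbols : List Char :=
  (" !\"#$%&'()*+,-./:;<=>?@[\\]^_`{|}~0123456789abcdefghijklmnopqrstuvwxyzABCDEFGHIJKLMNOPQRSTUVWXYZ").toList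

-- cited by port A's decreasing_by: plainText[16:] is drop 16
lemma pvSliceDrop (cs : List Char) :
    PySem.List.slice cs (some 16) none = cs.drop 16 := by
  have := PySem.List.slice_from cs (a := 16) (by norm_num)
  simpa using this

-- ===== PORT A =====
-- the while-loop of A: slices off a 16-char block (if/else on the length), sums index * len(symbols)**i, appends
def stringToBlockGo (cs : List Char) (output : List Int) : List Int :=
  if h : cs = [] then output
  else
    let bs := if 16 ≤ cs.length then PySem.List.slice cs (some 0) (some 16) else cs
    let rest := if 16 ≤ cs.length then PySem.List.slice cs (some 16) none else []
    let bn := (PySem.List.pyRange 0 (PySem.Chars.len bs) 1).foldl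
      (fun acc i => acc + PySem.Chars.find pvSymbols [PySem.List.pyGetD bs i ' ']
          * (PySem.Chars.len pvSymbols) ^ i.toNat) 0
    stringToBlockGo rest (output ++ [bn])
termination_by cs.length
decreasing_by
  simp only [pvSliceDrop]
  split
  · rw [List.length_drop]; have := List.length_pos_of_ne_nil h; omega
  · simpa using List.length_pos_of_ne_nil h

def stringToBlock (plainText : String) : List Int :=
  stringToBlockGo plainText.toList []

-- ===== PORT B =====
-- POWERS = [len(symbols) ** i for i in range(block_size)]
def pvPowers : List Int :=
  (PySem.List.pyRange 0 16 1).map (fun i => (PySem.Chars.len pvSymbols) ^ i.toNat)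

-- for pos, ch in enumerate(plainText): output[pos//16] += symbols.find(ch) * POWERS[pos%16]
def stringToBlock_alt (plainText : String) : List Int :=
  (PySem.List.enumerate plainText.toList 0).foldl
    (fun out p =>
      PySem.List.pySetD out (PySem.Int.floordiv p.1 16)
        (PySem.List.pyGetD out (PySem.Int.floordiv p.1 16) 0
          + PySem.Chars.find pvSymbols [p.2]
            * PySem.List.pyGetD pvPowers (PySem.Int.mod p.1 16) 0))
    (List.replicate ((plainText.toList.length + 16 - 1) / 16) 0)

-- ===== PRECONDITION & SPEC =====
def Spec_stringToBlock (plainText : String) (out : List Int) : Prop := out = stringToBlock_alt plainText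
instance (plainText : String) (out : List Int) : Decidable (Spec_stringToBlock plainText out) := by unfold Spec_stringToBlock; infer_instance

-- ===== CLAIM (what is proved, stated in full; the proofs are below) =====
def Claim_equal_stringToBlock : Prop := ∀ (plainText : String), Dom_stringToBlock plainText → Spec_stringToBlock plainText (stringToBlock plainText)

-- ===== LEMMAS AND PROOFS =====

-- the value of one block, positional digits from offset s (proof-side reference)
def pvBVal (bs : List Char) (s : Nat) : Int :=
  match bs with
  | [] => 0
  | c :: t => PySem.Chars.find pvSymbols [c] * (pvSymbols.length : Int) ^ s + pvBVal t (s + 1)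

-- the chunked reference both ports are compared with
def pvChunks (cs : List Char) : List Int :=
  if cs = [] then [] else pvBVal (cs.take 16) 0 :: pvChunks (cs.drop 16)
termination_by cs.length
decreasing_by
  rw [List.length_drop]
  have := List.length_pos_of_ne_nil (by assumption)
  omega

lemma pvBVal_succ (bs : List Char) (s : Nat) :
    pvBVal bs (s + 1) = (pvSymbols.length : Int) * pvBVal bs s := by
  induction bs generalizing s with
  | nil => simp [pvBVal]
  | cons c t ih => simp [pvBVal, ih, pow_succ]; ring

-- A's positional sum over indices equals pvBVal _ 0
lemma pvSumBVal (bs : List Char) :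
    ((List.range bs.length).map
      (fun k => PySem.Chars.find pvSymbols [bs.getD k ' '] * ((pvSymbols.length : Int)) ^ k)).sum
    = pvBVal bs 0 := by
  induction bs with
  | nil => simp [pvBVal]
  | cons c t ih =>
    rw [List.length_cons, List.range_succ_eq_map, List.map_cons, List.map_map, List.sum_cons]
    simp only [Function.comp_def, List.getD_cons_zero, List.getD_cons_succ, pow_zero, mul_one,
        pow_succ, ← mul_assoc]
    rw [List.sum_map_mul_right, ih]
    simp only [pvBVal, pvBVal_succ, pow_zero, mul_one]
    ring

-- A's inner loop (index * base**i summed over range) equals pvBVal _ 0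
lemma pvInner_eq (bs : List Char) :
    (PySem.List.pyRange 0 (PySem.Chars.len bs) 1).foldl
      (fun acc i => acc + PySem.Chars.find pvSymbols [PySem.List.pyGetD bs i ' ']
          * (PySem.Chars.len pvSymbols) ^ i.toNat) 0
    = pvBVal bs 0 := by
  rw [PySem.List.foldl_add]
  simp only [PySem.Chars.len, PySem.List.pyRange_one, List.map_map, zero_add, sub_zero,
      Int.toNat_natCast, Function.comp_def, PySem.List.pyGetD_natCast]
  exact pvSumBVal bs

-- plainText[:16] is take 16
lemma pvSliceTake (cs : List Char) :
    PySem.List.slice cs none (some 16) = cs.take 16 := by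
  have := PySem.List.slice_to cs (b := 16) (by norm_num)
  simpa using this

-- A-side loop-level equivalence
lemma pvGoEq (n : Nat) : ∀ (cs : List Char), cs.length ≤ n → ∀ (output : List Int),
    stringToBlockGo cs output = output ++ pvChunks cs := by
  induction n with
  | zero =>
    intro cs hlen output
    have h : cs = [] := by simpa using List.eq_nil_of_length_eq_zero (Nat.le_zero.mp hlen)
    rw [stringToBlockGo.eq_def, pvChunks.eq_def]
    simp [h]
  | succ n ih =>
    intro cs hlen output
    by_cases h : cs = []
    · rw [stringToBlockGo.eq_def, pvChunks.eq_def]; simp [h]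
    · rw [stringToBlockGo.eq_def, pvChunks.eq_def]
      simp only [dif_neg h, if_neg h]
      have hbs : (if 16 ≤ cs.length then PySem.List.slice cs (some 0) (some 16) else cs)
          = cs.take 16 := by
        split
        · rw [PySem.List.slice_zero_start, pvSliceTake]
        · rw [List.take_of_length_le (by omega)]
      have hrest : (if 16 ≤ cs.length then PySem.List.slice cs (some 16) none else ([] : List Char))
          = cs.drop 16 := by
        rw [pvSliceDrop]
        split
        · rfl
        · rw [List.drop_eq_nil_of_le (by omega)]
      have hne : 0 < cs.length := List.length_pos_of_ne_nil h
      rw [hbs, hrest, pvInner_eq,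
          ih _ (by rw [List.length_drop]; omega) _]
      simp

-- abbreviation for B's step function
def pvStep (out : List Int) (p : Int × Char) : List Int :=
  PySem.List.pySetD out (PySem.Int.floordiv p.1 16)
    (PySem.List.pyGetD out (PySem.Int.floordiv p.1 16) 0
      + PySem.Chars.find pvSymbols [p.2]
        * PySem.List.pyGetD pvPowers (PySem.Int.mod p.1 16) 0)

lemma pvPowAt (s : Nat) (h : s < 16) :
    PySem.List.pyGetD pvPowers ((s : Int)) 0 = (pvSymbols.length : Int) ^ s := by
  unfold pvPowers
  rw [PySem.List.pyGetD_map_pyRange_of_nonneg _ _ _ _ (by positivity) (by exact_mod_cast h)]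
  simp [PySem.Chars.len]

-- processing a block's characters at positions s, s+1, … (all < 16) accumulates into the head slot
lemma pvHeadFold (b : List Char) : ∀ (s : Nat), s + b.length ≤ 16 →
    ∀ (x : Int) (out : List Int),
    (PySem.List.enumerate b (s : Int)).foldl pvStep (x :: out)
      = (x + pvBVal b s) :: out := by
  induction b with
  | nil => intro s _ x out; simp [PySem.List.enumerate_nil, pvBVal]
  | cons c t ih =>
    intro s hs x out
    have hslt : s < 16 := by simp at hs; omega
    rw [PySem.List.enumerate_cons, List.foldl_cons]
    have hstep : pvStep (x :: out) ((s : Int), c)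
        = (x + PySem.Chars.find pvSymbols [c] * (pvSymbols.length : Int) ^ s) :: out := by
      unfold pvStep
      have hdiv : PySem.Int.floordiv (s : Int) 16 = ((s / 16 : Nat) : Int) := by
        exact_mod_cast PySem.Int.floordiv_natCast s 16
      have hmod : PySem.Int.mod (s : Int) 16 = ((s % 16 : Nat) : Int) := by
        exact_mod_cast PySem.Int.mod_natCast s 16
      have h16 : s / 16 = 0 := by omega
      have h16m : s % 16 = s := by omega
      rw [hdiv, hmod, h16, h16m, pvPowAt s hslt]
      rw [PySem.List.pySetD_of_nonneg _ _ (by norm_num),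
          PySem.List.pyGetD_of_nonneg _ _ (by norm_num)]
      simp
    rw [hstep]
    have := ih (s + 1) (by simp at hs ⊢; omega)
      (x + PySem.Chars.find pvSymbols [c] * (pvSymbols.length : Int) ^ s) out
    push_cast at this
    rw [this]
    simp [pvBVal, add_assoc]

-- index-shift helpers: acting at slot k+1 on y :: out is acting at slot k on out
lemma pvSetShift (y v : Int) (out : List Int) (k : Int) (hk : 0 ≤ k) :
    PySem.List.pySetD (y :: out) (k + 1) v = y :: PySem.List.pySetD out k v := by
  rw [PySem.List.pySetD_of_nonneg _ _ (by omega), PySem.List.pySetD_of_nonneg _ _ hk]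
  have h : (k + 1).toNat = k.toNat + 1 := by omega
  rw [h, List.set_cons_succ]

lemma pvGetShift (y d : Int) (out : List Int) (k : Int) (hk : 0 ≤ k) :
    PySem.List.pyGetD (y :: out) (k + 1) d = PySem.List.pyGetD out k d := by
  rw [PySem.List.pyGetD_of_nonneg _ _ (by omega), PySem.List.pyGetD_of_nonneg _ _ hk]
  have h : (k + 1).toNat = k.toNat + 1 := by omega
  rw [h, List.getD_cons_succ]

-- positions ≥ 16 leave the head slot alone and act shifted by one on the tail
lemma pvShiftFold (r : List Char) : ∀ (s : Int), 0 ≤ s → ∀ (y : Int) (out : List Int),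
    (PySem.List.enumerate r (16 + s)).foldl pvStep (y :: out)
      = y :: (PySem.List.enumerate r s).foldl pvStep out := by
  induction r with
  | nil => intro s _ y out; simp [PySem.List.enumerate_nil]
  | cons c t ih =>
    intro s hs y out
    rw [PySem.List.enumerate_cons, PySem.List.enumerate_cons, List.foldl_cons, List.foldl_cons]
    have hdiv : PySem.Int.floordiv (16 + s) 16 = PySem.Int.floordiv s 16 + 1 := by
      rw [PySem.Int.floordiv_eq_ediv_of_pos (by norm_num),
          PySem.Int.floordiv_eq_ediv_of_pos (by norm_num)]
      omega
    have hmod : PySem.Int.mod (16 + s) 16 = PySem.Int.mod s 16 := by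
      rw [PySem.Int.mod_eq_emod_of_pos (by norm_num), PySem.Int.mod_eq_emod_of_pos (by norm_num)]
      omega
    have hk : 0 ≤ PySem.Int.floordiv s 16 := by
      rw [PySem.Int.floordiv_eq_ediv_of_pos (by norm_num)]; omega
    have hstep : pvStep (y :: out) (16 + s, c) = y :: pvStep out (s, c) := by
      unfold pvStep
      rw [hdiv, hmod, pvGetShift _ _ _ _ hk, pvSetShift _ _ _ _ hk]
    rw [hstep, show 16 + s + 1 = 16 + (s + 1) by ring, ih (s + 1) (by omega)]

-- B's flat fold equals the chunked reference
lemma pvAltEq (n : Nat) : ∀ (cs : List Char), cs.length ≤ n →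
    (PySem.List.enumerate cs 0).foldl pvStep
        (List.replicate ((cs.length + 16 - 1) / 16) 0)
      = pvChunks cs := by
  induction n with
  | zero =>
    intro cs hlen
    have h : cs = [] := by simpa using List.eq_nil_of_length_eq_zero (Nat.le_zero.mp hlen)
    rw [pvChunks.eq_def]
    simp [h, PySem.List.enumerate_nil]
  | succ n ih =>
    intro cs hlen
    by_cases h : cs = []
    · rw [pvChunks.eq_def]; simp [h, PySem.List.enumerate_nil]
    · have hne : 0 < cs.length := List.length_pos_of_ne_nil h
      have hsplit : cs = cs.take 16 ++ cs.drop 16 := (List.take_append_drop 16 cs).symm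
      have hlb : (cs.take 16).length = min 16 cs.length := by simp
      have hinit : List.replicate ((cs.length + 16 - 1) / 16) (0 : Int)
          = 0 :: List.replicate (((cs.drop 16).length + 16 - 1) / 16) 0 := by
        rw [List.length_drop]
        have : (cs.length + 16 - 1) / 16 = (cs.length - 16 + 16 - 1) / 16 + 1 := by omega
        rw [this, List.replicate_succ]
      rw [pvChunks.eq_def, if_neg h]
      rw [show PySem.List.enumerate cs 0 = PySem.List.enumerate (cs.take 16 ++ cs.drop 16) 0 from
            by rw [List.take_append_drop]]
      rw [PySem.List.enumerate_append, List.foldl_append, hinit]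
      have hh := pvHeadFold (cs.take 16) 0 (by simp) 0
        (List.replicate (((cs.drop 16).length + 16 - 1) / 16) 0)
      simp only [Nat.cast_zero] at hh
      rw [hh]
      simp only [zero_add, hlb]
      by_cases h16 : 16 ≤ cs.length
      · have hmin : min 16 cs.length = 16 := by omega
        rw [hmin]
        push_cast
        have := pvShiftFold (cs.drop 16) 0 le_rfl (pvBVal (cs.take 16) 0)
          (List.replicate (((cs.drop 16).length + 16 - 1) / 16) 0)
        rw [add_zero] at this
        rw [show (cs.drop 16).length + 15 = (cs.drop 16).length + 16 - 1 by omega]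
        rw [this, ih (cs.drop 16) (by rw [List.length_drop]; omega)]
      · have hdrop : cs.drop 16 = [] := List.drop_eq_nil_of_le (by omega)
        rw [hdrop]
        simp [PySem.List.enumerate_nil, pvChunks]

-- ===== VERDICT (by name: the statement is the Claim_ definition above) =====
theorem stringToBlock_spec : Claim_equal_stringToBlock := by
  intro s _
  unfold Spec_stringToBlock stringToBlock stringToBlock_alt
  rw [pvGoEq s.toList.length s.toList le_rfl []]
  rw [← pvAltEq s.toList.length s.toList le_rfl]
  rfl
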